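-- pv_equiv track=rewrite | github.com/isaacd28/119-hw2 | part1.py | under_thousand
-- ===== SOURCE A (Python) =====
-- NUMS_0_19 = [
--     "zero", "one", "two", "three", "four", "five", "six", "seven",
--     "eight", "nine", "ten", "eleven", "twelve", "thirteen", "fourteen",
--     "fifteen", "sixteen", "seventeen", "eighteen", "nineteen"
-- ]
--
-- TENS = [
--     "", "", "twenty", "thirty", "forty", "fifty",
--     "sixty", "seventy", "eighty", "ninety"
-- ]
--
-- def under_thousand(n):
--     if n < 20:
--         return NUMS_0_19[n]
--     elif n < 100:
--         tens = TENS[n // 10]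
--         ones = "" if n % 10 == 0 else "-" + NUMS_0_19[n % 10]
--         return tens + ones
--     else:
--         hundreds = n // 100
--         rest = n % 100
--         if rest == 0:
--             return NUMS_0_19[hundreds] + " hundred"
--         else:
--             return NUMS_0_19[hundreds] + " hundred " + under_thousand(rest)
-- ===== SOURCE B (Python) =====
-- NUMS_0_19 = [
--     "zero", "one", "two", "three", "four", "five", "six", "seven",
--     "eight", "nine", "ten", "eleven", "twelve", "thirteen", "fourteen",
--     "fifteen", "sixteen", "seventeen", "eighteen", "nineteen"
-- ]
--
-- TENS = [
--     "", "", "twenty", "thirty", "forty", "fifty",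
--     "sixty", "seventy", "eighty", "ninety"
-- ]
--
-- def under_thousand(n):
--     # teens and below are irregular words: direct lookup
--     if n < 20:
--         return NUMS_0_19[n]
--     # staged: decompose all digit groups up front, render each non-empty
--     # group to its phrase, then join the phrases with spaces
--     hundreds, rest = divmod(n, 100)
--     tens_d, ones = divmod(rest, 10)
--     pieces = []
--     if hundreds:
--         pieces.append(NUMS_0_19[hundreds] + " hundred")
--     if rest:
--         if rest < 20:
--             pieces.append(NUMS_0_19[rest])
--         else:
--             pieces.append(TENS[tens_d] + ("-" + NUMS_0_19[ones] if ones else ""))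
--     return " ".join(pieces)
-- ===== Notes on version B (the rewrite author's own statement) =====
-- stated objective: alternative
-- what changed: Replaces A's recursive branch chain by a staged pipeline: divmod decomposes all digit groups up front, each non-empty group is rendered to a phrase collected in a list, and the result is ' '.join of that list (no recursion, no hundreds-case string concatenation).
import Mathlib
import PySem

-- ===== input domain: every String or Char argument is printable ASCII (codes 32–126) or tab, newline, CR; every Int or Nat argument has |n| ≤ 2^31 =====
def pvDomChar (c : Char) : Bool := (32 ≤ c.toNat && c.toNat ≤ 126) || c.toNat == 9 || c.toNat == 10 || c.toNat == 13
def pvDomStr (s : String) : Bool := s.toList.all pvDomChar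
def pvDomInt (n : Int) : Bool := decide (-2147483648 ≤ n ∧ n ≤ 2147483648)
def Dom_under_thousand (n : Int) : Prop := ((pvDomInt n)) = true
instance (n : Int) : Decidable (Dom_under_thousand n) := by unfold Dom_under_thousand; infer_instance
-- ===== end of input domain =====

-- B stages the work: divmod the digit groups up front, render each non-empty group to a
-- phrase in a list, and ' '.join the phrases — no recursion (objective: alternative).

-- shared module constants
def nums_0_19 : List String :=
  ["zero", "one", "two", "three", "four", "five", "six", "seven",
   "eight", "nine", "ten", "eleven", "twelve", "thirteen", "fourteen",
   "fifteen", "sixteen", "seventeen", "eighteen", "nineteen"]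

def tens : List String :=
  ["", "", "twenty", "thirty", "forty", "fifty",
   "sixty", "seventy", "eighty", "ninety"]

-- ===== PORT A =====
def under_thousand (n : Int) : String :=
  if n < 20 then
    PySem.List.pyGetD nums_0_19 n ""
  else if n < 100 then
    let t := PySem.List.pyGetD tens (PySem.Int.floordiv n 10) ""
    let o := if PySem.Int.mod n 10 = 0 then "" else "-" ++ PySem.List.pyGetD nums_0_19 (PySem.Int.mod n 10) ""
    t ++ o
  else
    let hundreds := PySem.Int.floordiv n 100
    let rest := PySem.Int.mod n 100
    if rest = 0 then
      PySem.List.pyGetD nums_0_19 hundreds "" ++ " hundred"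
    else
      PySem.List.pyGetD nums_0_19 hundreds "" ++ " hundred " ++ under_thousand rest
termination_by n.toNat
decreasing_by
  have h := PySem.Int.mod_eq_emod_of_pos (a := n) (b := 100) (by omega)
  have _h1 : 0 ≤ n % 100 := Int.emod_nonneg n (by omega)
  have _h2 : n % 100 < 100 := Int.emod_lt_of_pos n (by omega)
  omega

-- ===== PORT B =====
def under_thousand_alt (n : Int) : String :=
  if n < 20 then
    PySem.List.pyGetD nums_0_19 n ""
  else
    let hundreds := PySem.Int.floordiv n 100
    let rest := PySem.Int.mod n 100
    let tens_d := PySem.Int.floordiv rest 10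
    let ones := PySem.Int.mod rest 10
    let pieces : List String :=
      (if hundreds ≠ 0 then [PySem.List.pyGetD nums_0_19 hundreds "" ++ " hundred"] else []) ++
      (if rest ≠ 0 then
        [if rest < 20 then PySem.List.pyGetD nums_0_19 rest ""
         else PySem.List.pyGetD tens tens_d "" ++
           (if ones ≠ 0 then "-" ++ PySem.List.pyGetD nums_0_19 ones "" else "")]
       else [])
    PySem.Str.join " " pieces

-- ===== PRECONDITION & SPEC =====
-- Pre_ is exactly where Python A returns; outside it a word-list index is out of range and A
-- raises IndexError (B raises there identically).
def Pre_under_thousand (n : Int) : Prop := -20 ≤ n ∧ n < 2000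
instance (n : Int) : Decidable (Pre_under_thousand n) := by unfold Pre_under_thousand; infer_instance
def pvWitness_under_thousand : Int := (123)

def Spec_under_thousand (n : Int) (out : String) : Prop := out = under_thousand_alt n
instance (n : Int) (out : String) : Decidable (Spec_under_thousand n out) := by unfold Spec_under_thousand; infer_instance

-- ===== CLAIM =====
def Claim_equal_under_thousand : Prop := ∀ (n : Int), Dom_under_thousand n → Pre_under_thousand n → Spec_under_thousand n (under_thousand n)

-- ===== LEMMAS AND PROOFS =====

-- A below 100 in closed branch form (both branches of A, no recursion reached)
theorem under_thousand_lt_100 (m : Int) (hm : m < 100) :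
    under_thousand m =
      if m < 20 then PySem.List.pyGetD nums_0_19 m ""
      else PySem.List.pyGetD tens (PySem.Int.floordiv m 10) "" ++
        (if PySem.Int.mod m 10 ≠ 0 then "-" ++ PySem.List.pyGetD nums_0_19 (PySem.Int.mod m 10) "" else "") := by
  rw [under_thousand]
  by_cases h20 : m < 20
  · simp [h20]
  · simp only [h20, if_false, hm, if_true]
    by_cases hz : PySem.Int.mod m 10 = 0 <;> simp only [hz, if_true, if_false, ne_eq, not_true, not_false_iff]

theorem join_singleton (a : String) : PySem.Str.join " " [a] = a := by
  apply String.toList_injective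
  rw [PySem.Str.toList_join]
  simp [PySem.Chars.join, List.intercalate]

theorem join_pair (a b : String) : PySem.Str.join " " [a, b] = a ++ " " ++ b := by
  apply String.toList_injective
  rw [PySem.Str.toList_join]
  simp [PySem.Chars.join, List.intercalate, List.intersperse]

-- ===== VERDICT =====
theorem under_thousand_spec : Claim_equal_under_thousand := by
  intro n _ hpre
  unfold Spec_under_thousand under_thousand_alt
  by_cases h20 : n < 20
  · rw [under_thousand]; simp [h20]
  · simp only [h20, if_false]
    have hmod := PySem.Int.mod_eq_emod_of_pos (a := n) (b := 100) (by omega)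
    have hdiv := PySem.Int.floordiv_eq_ediv_of_pos (a := n) (b := 100) (by omega)
    by_cases h100 : n < 100
    · -- hundreds group empty, rest = n ≥ 20
      have hh : PySem.Int.floordiv n 100 = 0 := by rw [hdiv]; omega
      have hr : PySem.Int.mod n 100 = n := by rw [hmod]; omega
      rw [under_thousand_lt_100 n h100]
      simp only [hh, hr]
      have hne : n ≠ 0 := by omega
      simp only [ne_eq, not_true, if_false, hne, not_false_iff, if_true, h20, if_false,
        List.nil_append]
      rw [join_singleton]
    · -- n ≥ 100
      have hrest0 : 0 ≤ PySem.Int.mod n 100 := by rw [hmod]; exact Int.emod_nonneg n (by omega)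
      have hrest1 : PySem.Int.mod n 100 < 100 := by rw [hmod]; exact Int.emod_lt_of_pos n (by omega)
      have hhpos : PySem.Int.floordiv n 100 ≠ 0 := by rw [hdiv]; omega
      rw [under_thousand]
      simp only [h20, if_false, h100, if_false, hhpos, ne_eq, not_false_iff, if_true]
      by_cases hz : PySem.Int.mod n 100 = 0
      · simp only [hz, not_true, if_false, if_true, List.append_nil]
        rw [join_singleton]
      · simp only [hz, not_false_iff, if_true, if_false, List.singleton_append]
        rw [join_pair, under_thousand_lt_100 (PySem.Int.mod n 100) hrest1]
        by_cases hr20 : PySem.Int.mod n 100 < 20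
        · simp only [hr20, if_true]
          rw [show (" hundred " : String) = " hundred" ++ " " from rfl, ← String.append_assoc]
        · simp only [hr20, if_false]
          rw [show (" hundred " : String) = " hundred" ++ " " from rfl]
          simp [String.append_assoc]
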